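-- pv_equiv track=rewrite | github.com/luis-perez-one/formula1-history-1950-2020 | py-scripts/time_utils.py | hms_str_to_pg_interval
-- ===== SOURCE A (Python) =====
-- def hms_str_to_pg_interval(time_string):
--     timeUnitDelimeterQty = time_string.count(':')
--     rfindEndPosition = len(time_string)
--     separatorDict = {   0 : 'S',
--                         1 : 'M',
--                         2 : 'H',
--                         3 : 'D'
--                             }
--     for ocurrence in range (0, timeUnitDelimeterQty):
--         ocurrencePosition = time_string.rfind(':', 0, rfindEndPosition)
--         time_string = time_string[:ocurrencePosition] + separatorDict[ocurrence] + time_string[ocurrencePosition + 1:]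
--         rfindEndPosition = ocurrencePosition -1
--
--     firstChar = separatorDict[timeUnitDelimeterQty]
--     time_string = firstChar + time_string
--
--     return time_string
-- ===== SOURCE B (Python) =====
-- def hms_str_to_pg_interval(time_string):
--     separatorDict = {0: 'S', 1: 'M', 2: 'H', 3: 'D'}
--     remaining = time_string.count(':')
--     pieces = [separatorDict[remaining]]
--     for ch in time_string:
--         if ch == ':':
--             remaining -= 1
--             pieces.append(separatorDict[remaining])
--         else:
--             pieces.append(ch)
--     return ''.join(pieces)
-- ===== Notes on version B (the rewrite author's own statement) =====
-- stated objective: simpler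
-- what changed: Replaces the right-to-left rfind/slice-reassembly loop by a single left-to-right pass that emits the top unit letter up front and swaps each colon for the next unit letter via a decrementing counter, joined at the end.
-- intended difference: On inputs with two adjacent colons (and at most 3 colons in total), A's rfind end bound of position minus one skips a colon and the subsequent negative-index slicing duplicates text, so A returns garbage with leftover colons or permuted unit letters; B returns the intended labelling, as shown by the recorded witness pair. — e.g. on hms_str_to_pg_interval("a::b"): A returns "Ha:SMa:Sb", B returns "HaMSb"
import Mathlib
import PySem

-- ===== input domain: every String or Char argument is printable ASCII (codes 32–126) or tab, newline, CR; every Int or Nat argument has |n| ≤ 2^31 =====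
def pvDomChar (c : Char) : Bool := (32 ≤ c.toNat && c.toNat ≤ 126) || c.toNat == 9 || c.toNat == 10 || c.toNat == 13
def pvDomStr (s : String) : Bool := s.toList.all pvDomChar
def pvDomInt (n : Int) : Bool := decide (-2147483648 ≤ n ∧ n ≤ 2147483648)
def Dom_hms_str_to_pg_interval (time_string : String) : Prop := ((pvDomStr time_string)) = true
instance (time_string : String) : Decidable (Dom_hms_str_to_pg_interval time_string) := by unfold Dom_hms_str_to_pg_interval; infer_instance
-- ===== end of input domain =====

-- B replaces the right-to-left rfind and slice reassembly loop by one left-to-right pass with a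
-- decrementing unit counter (objective: simpler); on inputs containing '::' A's rfind end bound
-- skips a colon and garbles the string, and B returns the intended labelling (see D_ below).

-- ===== PORT A =====
-- separatorDict = {0:'S', 1:'M', 2:'H', 3:'D'} (both Pythons build this same literal)
def pvSepA : PySem.Dict Int String :=
  ((((PySem.Dict.empty).insert 0 "S").insert 1 "M").insert 2 "H").insert 3 "D"

-- one iteration of A's for-loop: state = (time_string as chars, rfindEndPosition)
def pvAStep (st : List Char × Int) (ocurrence : Int) : List Char × Int :=
  let s := st.1
  let ocurrencePosition := PySem.Chars.rfindFrom s [':'] 0 (some st.2)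
  let s' := PySem.List.slice s none (some ocurrencePosition)
              ++ ((pvSepA.get? ocurrence).getD "").toList
              ++ PySem.List.slice s (some (ocurrencePosition + 1)) none
  (s', ocurrencePosition - 1)

-- literal port of A; the dict lookups use '(get? k).getD ""': a missing key is Python's KeyError,
-- which happens exactly when the colon count exceeds 3 — those inputs are excluded by Pre_ below.
def hms_str_to_pg_interval (time_string : String) : String :=
  let timeUnitDelimeterQty : Int := (PySem.Str.count time_string ":" : Int)
  let state := (PySem.List.pyRange 0 timeUnitDelimeterQty 1).foldl pvAStep
    (time_string.toList, (time_string.toList.length : Int))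
  let firstChar := ((pvSepA.get? timeUnitDelimeterQty).getD "").toList
  String.ofList (firstChar ++ state.1)

-- ===== PORT B =====
-- Source B builds the same separatorDict literal; the port shares the constant pvSepA
-- one iteration of B's for-loop: state = (pieces, remaining)
def pvBStep (st : List String × Int) (ch : Char) : List String × Int :=
  if ch == ':' then (st.1 ++ [((pvSepA.get? (st.2 - 1)).getD "")], st.2 - 1)
  else (st.1 ++ [String.ofList [ch]], st.2)

-- literal port of B (Source B): one pass over the characters, ''.join of the pieces at the end
def hms_str_to_pg_interval_alt (time_string : String) : String :=
  let remaining : Int := (PySem.Str.count time_string ":" : Int)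
  let st := time_string.toList.foldl pvBStep
    ([((pvSepA.get? remaining).getD "")], remaining)
  PySem.Str.join "" st.1

-- ===== PRECONDITION & SPEC =====
-- A raises KeyError (separatorDict[k] with k ≥ 4) exactly when the string has 4 or more colons;
-- B raises there too. Pre_ admits every input on which A returns.
def Pre_hms_str_to_pg_interval (time_string : String) : Prop :=
  PySem.Str.count time_string ":" ≤ 3
instance (time_string : String) : Decidable (Pre_hms_str_to_pg_interval time_string) := by
  unfold Pre_hms_str_to_pg_interval; infer_instance

def pvWitness_hms_str_to_pg_interval : String := "1:02:03"

-- On inputs with two adjacent colons, A's rfind end bound of position minus one skips a colon and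
-- the subsequent negative-index slicing duplicates text, so A returns garbage with leftover colons
-- or permuted unit letters; B returns the intended labelling (witness pair recorded below).
def D_hms_str_to_pg_interval (time_string : String) : Prop :=
  PySem.Str.isIn "::" time_string = true
instance (time_string : String) : Decidable (D_hms_str_to_pg_interval time_string) := by
  unfold D_hms_str_to_pg_interval; infer_instance

def Spec_hms_str_to_pg_interval (time_string : String) (out : String) : Prop :=
  ¬ D_hms_str_to_pg_interval time_string → out = hms_str_to_pg_interval_alt time_string
instance (time_string : String) (out : String) : Decidable (Spec_hms_str_to_pg_interval time_string out) := by
  unfold Spec_hms_str_to_pg_interval; infer_instance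

def pvDiffWitness_hms_str_to_pg_interval : String := "a::b"
def pvDiffWitnessOut_hms_str_to_pg_interval : String × String := ("Ha:SMa:Sb", "HaMSb")

-- ===== CLAIM (what is proved, stated in full; the proofs are below) =====
def Claim_unchanged_hms_str_to_pg_interval : Prop := ∀ (time_string : String), Dom_hms_str_to_pg_interval time_string → Pre_hms_str_to_pg_interval time_string → Spec_hms_str_to_pg_interval time_string (hms_str_to_pg_interval time_string)
def Claim_changed_hms_str_to_pg_interval : Prop := Dom_hms_str_to_pg_interval (pvDiffWitness_hms_str_to_pg_interval) ∧ Pre_hms_str_to_pg_interval (pvDiffWitness_hms_str_to_pg_interval) ∧ D_hms_str_to_pg_interval (pvDiffWitness_hms_str_to_pg_interval) ∧ hms_str_to_pg_interval (pvDiffWitness_hms_str_to_pg_interval) = pvDiffWitnessOut_hms_str_to_pg_interval.1 ∧ hms_str_to_pg_interval_alt (pvDiffWitness_hms_str_to_pg_interval) = pvDiffWitnessOut_hms_str_to_pg_interval.2 ∧ pvDiffWitnessOut_hms_str_to_pg_interval.1 ≠ pvDiffWitnessOut_hms_str_to_pg_interval.2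
def Claim_exact_hms_str_to_pg_interval : Prop := ∀ (time_string : String), Dom_hms_str_to_pg_interval time_string → Pre_hms_str_to_pg_interval time_string → D_hms_str_to_pg_interval time_string → hms_str_to_pg_interval time_string ≠ hms_str_to_pg_interval_alt time_string

-- ===== LEMMAS AND PROOFS =====

-- count.go counts the colons (single-character needle, enough fuel)
theorem hms_count_go (l : List Char) : ∀ (f acc : Nat), l.length ≤ f →
    PySem.Chars.count.go [':'] f l acc = acc + l.count ':' := by
  induction l with
  | nil => intro f acc h; cases f <;> simp [PySem.Chars.count.go]
  | cons c t ih =>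
    intro f acc h
    cases f with
    | zero => simp at h
    | succ f =>
      by_cases hc : c = ':'
      · subst hc
        simp [PySem.Chars.count.go, List.isPrefixOf, ih f (acc+1) (by simpa using h)]
        omega
      · have : ([':'].isPrefixOf (c :: t)) = false := by
          simp [List.isPrefixOf]; exact fun h => hc h.symm
        simp [PySem.Chars.count.go, this, ih f acc (by simpa using h), hc]

theorem hms_count_eq (cs : List Char) : PySem.Chars.count cs [':'] = cs.count ':' := by
  simp [PySem.Chars.count, hms_count_go cs cs.length 0 le_rfl]

theorem hms_inter_cons (a : List Char) (ps : List (List Char)) (h : ps ≠ []) :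
    List.intercalate [':'] (a :: ps) = a ++ ':' :: List.intercalate [':'] ps := by
  obtain ⟨q, qs, rfl⟩ := List.exists_cons_of_ne_nil h
  simp [List.intercalate]

-- every string is an intercalation of colon-free parts, one part per colon plus one
theorem hms_decomp (cs : List Char) : ∃ ps : List (List Char), ps ≠ [] ∧
    (∀ p ∈ ps, ':' ∉ p) ∧ cs = List.intercalate [':'] ps ∧ ps.length = cs.count ':' + 1 := by
  induction cs with
  | nil => exact ⟨[[]], by simp [List.intercalate]⟩
  | cons c t ih =>
    obtain ⟨ps, hne, hfree, heq, hlen⟩ := ih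
    by_cases hc : c = ':'
    · subst hc
      refine ⟨[] :: ps, by simp, ?_, ?_, ?_⟩
      · intro p hp
        rcases List.mem_cons.mp hp with rfl | hp
        · simp
        · exact hfree p hp
      · rw [hms_inter_cons [] ps hne, ← heq]; simp
      · simp [hlen]
    · obtain ⟨p, rest, rfl⟩ := List.exists_cons_of_ne_nil hne
      refine ⟨(c :: p) :: rest, by simp, ?_, ?_, ?_⟩
      · intro q hq
        rcases List.mem_cons.mp hq with rfl | hq
        · intro hmem
          rcases List.mem_cons.mp hmem with h | h
          · exact hc h.symm
          · exact hfree p (by simp) h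
        · exact hfree q (by simp [hq])
      · rcases rest with _ | ⟨r, rs⟩
        · simpa [List.intercalate] using heq
        · rw [hms_inter_cons (c :: p) (r :: rs) (by simp)] at *
          rw [hms_inter_cons p (r :: rs) (by simp)] at heq
          simp [heq]
      · simpa [hc] using hlen

-- rfind.go started at or beyond the last colon finds it
theorem hms_rfind_go (L R : List Char) (hR : ':' ∉ R) :
    ∀ j : Nat, L.length ≤ j → PySem.Chars.rfind.go (L ++ ':' :: R) [':'] j = (L.length : Int) := by
  have hpre : [':'].isPrefixOf ((L ++ ':' :: R).drop L.length) = true := by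
    rw [List.drop_left]; simp [List.isPrefixOf]
  have hnot : ∀ k, L.length < k → [':'].isPrefixOf ((L ++ ':' :: R).drop k) = false := by
    intro k hk
    rw [List.drop_append]
    have h1 : L.drop k = [] := List.drop_eq_nil_of_le (by omega)
    have h2 : (':' :: R).drop (k - L.length) = R.drop (k - L.length - 1) := by
      have : k - L.length = (k - L.length - 1) + 1 := by omega
      rw [this]; simp
    rw [h1, h2]
    cases hd : R.drop (k - L.length - 1) with
    | nil => simp [List.isPrefixOf]
    | cons c t =>
      have hc : c ∈ R := by
        have : c ∈ R.drop (k - L.length - 1) := by rw [hd]; simp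
        exact List.mem_of_mem_drop this
      simp [List.isPrefixOf]
      intro hcc; exact hR (hcc ▸ hc)
  intro j
  induction j with
  | zero =>
    intro h
    have hL : L = [] := by simpa using h
    subst hL
    simpa [PySem.Chars.rfind.go] using hpre
  | succ j ih =>
    intro h
    by_cases hj : L.length = j + 1
    · rw [PySem.Chars.rfind.go]
      rw [hj] at hpre
      simp [hpre, hj]
    · have hlt : L.length ≤ j := by omega
      rw [PySem.Chars.rfind.go]
      simp [hnot (j+1) (by omega), ih hlt]

-- s.rfind(':', 0, e) when the searched region [0,e) ends inside the colon-free block R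
theorem hms_rfindFrom (L R rest : List Char) (hR : ':' ∉ R) (e : Int)
    (h1 : (L.length : Int) < e) (h2 : e ≤ (L.length : Int) + 1 + R.length) :
    PySem.Chars.rfindFrom (L ++ ':' :: (R ++ rest)) [':'] 0 (some e) = (L.length : Int) := by
  have hlen : ((L ++ ':' :: (R ++ rest)).length : Int) = L.length + 1 + R.length + rest.length := by
    simp; push_cast; ring
  have he0 : (0:Int) ≤ e := by omega
  have hen : ¬ ((L ++ ':' :: (R ++ rest)).length : Int) < e := by omega
  have htake : (L ++ ':' :: (R ++ rest)).take e.toNat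
      = L ++ ':' :: (R.take (e.toNat - L.length - 1)) := by
    have h3 : L.length + 1 ≤ e.toNat := by omega
    have h4 : e.toNat - L.length - 1 ≤ R.length := by omega
    rw [List.take_append]
    rw [List.take_of_length_le (by omega)]
    congr 1
    have : e.toNat - L.length = (e.toNat - L.length - 1) + 1 := by omega
    rw [this]
    simp [List.take_append_of_le_length h4]
  have hfree : ':' ∉ R.take (e.toNat - L.length - 1) := fun h => hR (List.mem_of_mem_take h)
  rw [PySem.Chars.rfindFrom]
  simp only [hen, if_false]
  have : ¬ e < 0 := by omega
  simp only [this, if_false]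
  have hst : ¬ ((0:Int) < 0) := by omega
  rw [if_neg (by omega)]
  simp only [if_neg hst, Int.toNat_zero, List.drop_zero]
  rw [htake, PySem.Chars.rfind,
    hms_rfind_go L (R.take (e.toNat - L.length - 1)) hfree _ (by simp)]
  rw [if_neg (by omega)]
  omega

theorem hms_take (L X : List Char) : (L ++ ':' :: X).take L.length = L := List.take_left

theorem hms_drop (L X : List Char) : (L ++ ':' :: X).drop (L.length + 1) = X := by
  rw [List.drop_append]; simp

-- one iteration of A's loop, on a state whose searched region ends inside the colon-free block R
theorem hms_astep (L R rest : List Char) (hR : ':' ∉ R) (e occ : Int)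
    (h1 : (L.length : Int) < e) (h2 : e ≤ (L.length : Int) + 1 + R.length) :
    pvAStep (L ++ ':' :: (R ++ rest), e) occ
      = (L ++ ((pvSepA.get? occ).getD "").toList ++ (R ++ rest), (L.length : Int) - 1) := by
  have hpos := hms_rfindFrom L R rest hR e h1 h2
  simp only [pvAStep, hpos]
  rw [PySem.List.slice_to _ (b := (L.length : Int)) (by omega),
    PySem.List.slice_from _ (a := (L.length : Int) + 1) (by omega)]
  have ht1 : ((L.length : Int)).toNat = L.length := by omega
  have ht2 : ((L.length : Int) + 1).toNat = L.length + 1 := by omega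
  rw [ht1, ht2, hms_take, hms_drop]

-- the first loop iteration: the region ends at the end of the string, rest is empty
theorem hms_astep0 (L R : List Char) (hR : ':' ∉ R) (e occ : Int)
    (h1 : (L.length : Int) < e) (h2 : e ≤ (L.length : Int) + 1 + R.length) :
    pvAStep (L ++ ':' :: R, e) occ
      = (L ++ ((pvSepA.get? occ).getD "").toList ++ R, (L.length : Int) - 1) := by
  have h := hms_astep L R [] hR e occ h1 (by simpa using h2)
  simpa using h

theorem hms_intercalate_nil (l : List (List Char)) : List.intercalate [] l = l.flatten := by
  induction l with
  | nil => simp [List.intercalate]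
  | cons a t ih =>
    cases t with
    | nil => simp [List.intercalate]
    | cons b r =>
      simp only [List.intercalate, List.intersperse] at *
      simp_all

theorem hms_flat_map (l : List Char) : (List.map (fun c => [c]) l).flatten = l := by
  induction l with
  | nil => rfl
  | cons a t ih => simp [ih]

theorem hms_join (l : List String) :
    PySem.Str.join "" l = String.ofList (l.map String.toList).flatten := by
  simp [PySem.Str.join, PySem.Chars.join, hms_intercalate_nil]

-- B's loop walks through a colon-free block by appending its characters as singleton pieces
theorem hms_bfold (p : List Char) (hp : ':' ∉ p) : ∀ (acc : List String) (r : Int),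
    p.foldl pvBStep (acc, r) = (acc ++ p.map (fun c => String.ofList [c]), r) := by
  induction p with
  | nil => intro acc r; simp
  | cons c t ih =>
    intro acc r
    have hc : (c == ':') = false := by
      simp only [beq_eq_false_iff_ne, ne_eq]
      intro h; exact hp (by simp [h])
    have ht : ':' ∉ t := fun h => hp (by simp [h])
    rw [List.foldl_cons]
    have hstep : pvBStep (acc, r) c = (acc ++ [String.ofList [c]], r) := by
      simp only [pvBStep, hc]; simp
    rw [hstep, ih ht]
    simp

-- ——— lemmas for the tight claim (A ≠ B everywhere inside D_) ———

-- rfind.go finds nothing in a colon-free string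
theorem hms_rfind_go_none (t : List Char) (ht : ':' ∉ t) :
    ∀ j : Nat, PySem.Chars.rfind.go t [':'] j = -1 := by
  have hnot : ∀ k : Nat, [':'].isPrefixOf (t.drop k) = false := by
    intro k
    cases hd : t.drop k with
    | nil => simp [List.isPrefixOf]
    | cons c r =>
      have hc : c ∈ t := by
        have : c ∈ t.drop k := by rw [hd]; simp
        exact List.mem_of_mem_drop this
      simp [List.isPrefixOf]
      intro hcc; exact ht (hcc ▸ hc)
  intro j
  induction j with
  | zero =>
    rw [PySem.Chars.rfind.go]
    simp [show ([':'].isPrefixOf t) = false from by simpa using hnot 0]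
  | succ j ih => rw [PySem.Chars.rfind.go]; simp [hnot (j+1), ih]

-- s.rfind(':', 0, e) misses when the region [0,e) is colon-free
theorem hms_rfindFrom_none (s : List Char) (e : Int) (h0 : 0 ≤ e)
    (hn : e ≤ s.length) (hfree : ':' ∉ s.take e.toNat) :
    PySem.Chars.rfindFrom s [':'] 0 (some e) = -1 := by
  rw [PySem.Chars.rfindFrom]
  simp only [not_lt.mpr hn, if_false]
  simp only [not_lt.mpr h0, if_false]
  have hst : ¬ ((0:Int) < 0) := by omega
  rw [if_neg (by omega)]
  simp only [if_neg hst, Int.toNat_zero, List.drop_zero]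
  rw [PySem.Chars.rfind, hms_rfind_go_none _ hfree]
  simp

-- s.rfind(':', 0, -1) finds the colon before the nonempty colon-free suffix R
theorem hms_rfindFrom_neg_one (L R : List Char) (hR : ':' ∉ R) (hRne : R ≠ []) :
    PySem.Chars.rfindFrom (L ++ ':' :: R) [':'] 0 (some (-1)) = (L.length : Int) := by
  have hRlen : 0 < R.length := List.length_pos_iff.mpr hRne
  have hlen : ((L ++ ':' :: R).length : Int) = L.length + 1 + R.length := by
    simp; push_cast; ring
  rw [PySem.Chars.rfindFrom]
  have hc1 : ¬ (((L ++ ':' :: R).length : Int) < -1) := by omega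
  have hc2 : ((-1:Int) < 0) := by omega
  have hc3 : ¬ ((-1:Int) + ((L ++ ':' :: R).length : Int) < 0) := by omega
  have hst : ¬ ((0:Int) < 0) := by omega
  simp only [hc1, if_false, hc2, if_true, hc3, hst, Int.toNat_zero, List.drop_zero]
  have htake : (L ++ ':' :: R).take ((-1) + ((L ++ ':' :: R).length : Int)).toNat
      = L ++ ':' :: (R.take (R.length - 1)) := by
    have h5 : ((-1) + ((L ++ ':' :: R).length : Int)).toNat = L.length + 1 + (R.length - 1) := by omega
    rw [h5, List.take_append, List.take_of_length_le (by omega)]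
    congr 1
    have h6 : L.length + 1 + (R.length - 1) - L.length = (R.length - 1) + 1 := by omega
    rw [h6]
    simp [List.take_append_of_le_length (by omega : R.length - 1 ≤ R.length)]
  have hfree : ':' ∉ R.take (R.length - 1) := fun h => hR (List.mem_of_mem_take h)
  rw [htake, PySem.Chars.rfind, hms_rfind_go L _ hfree _ (by simp)]
  rw [if_neg (by omega)]
  omega

-- one iteration of A's loop when rfind returns -1: negative-index slicing duplicates the string
theorem hms_astep_miss (s : List Char) (e occ : Int)
    (hmiss : PySem.Chars.rfindFrom s [':'] 0 (some e) = -1) :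
    pvAStep (s, e) occ = (s.dropLast ++ ((pvSepA.get? occ).getD "").toList ++ s, -2) := by
  simp only [pvAStep, hmiss]
  rw [PySem.List.slice_to_neg_one]
  rw [show (-1 : Int) + 1 = 0 from by norm_num, PySem.List.slice_zero_start,
    PySem.List.slice_none_none]
  norm_num


-- one iteration of A's loop with rfindEndPosition = -1 (Python's negative end reopens the search)
theorem hms_astep_neg (L R : List Char) (hR : ':' ∉ R) (hRne : R ≠ []) (occ : Int) :
    pvAStep (L ++ ':' :: R, -1) occ
      = (L ++ ((pvSepA.get? occ).getD "").toList ++ R, (L.length : Int) - 1) := by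
  have hpos := hms_rfindFrom_neg_one L R hR hRne
  simp only [pvAStep, hpos]
  rw [PySem.List.slice_to _ (b := (L.length : Int)) (by omega),
    PySem.List.slice_from _ (a := (L.length : Int) + 1) (by omega)]
  have ht1 : ((L.length : Int)).toNat = L.length := by omega
  have ht2 : ((L.length : Int) + 1).toNat = L.length + 1 := by omega
  rw [ht1, ht2, hms_take, hms_drop]

-- every separatorDict value is colon-free (any key)
theorem hms_sep_free (k : Int) : ':' ∉ ((pvSepA.get? k).getD "").toList := by
  by_cases h0 : k = 0
  · subst h0; decide
  by_cases h1 : k = 1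
  · subst h1; decide
  by_cases h2 : k = 2
  · subst h2; decide
  by_cases h3 : k = 3
  · subst h3; decide
  have : pvSepA.get? k = none := by
    simp [pvSepA, PySem.Dict.get?, PySem.Dict.insert, PySem.Dict.empty]
    refine ⟨by omega, by omega, by omega, by omega⟩
  rw [this]
  simp

-- B's pieces never contain a colon
theorem hms_bpieces (cs : List Char) : ∀ (acc : List String) (r : Int),
    (∀ p ∈ acc, ':' ∉ p.toList) →
    ∀ p ∈ (cs.foldl pvBStep (acc, r)).1, ':' ∉ p.toList := by
  induction cs with
  | nil => intro acc r hacc; simpa using hacc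
  | cons c t ih =>
    intro acc r hacc
    rw [List.foldl_cons]
    by_cases hc : c = ':'
    · subst hc
      have : pvBStep (acc, r) ':' = (acc ++ [((pvSepA.get? (r - 1)).getD "")], r - 1) := by
        simp [pvBStep]
      rw [this]
      apply ih
      intro p hp
      rcases List.mem_append.mp hp with h | h
      · exact hacc p h
      · rcases List.mem_singleton.mp h with rfl
        exact hms_sep_free (r - 1)
    · have hcb : (c == ':') = false := by simp [hc]
      have : pvBStep (acc, r) c = (acc ++ [String.ofList [c]], r) := by
        simp only [pvBStep, hcb]; simp
      rw [this]
      apply ih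
      intro p hp
      rcases List.mem_append.mp hp with h | h
      · exact hacc p h
      · rcases List.mem_singleton.mp h with rfl
        intro hmem
        rw [String.toList_ofList] at hmem
        exact hc (List.mem_singleton.mp hmem).symm

-- B's output never contains a colon
theorem hms_b_no_colon (s : String) : ':' ∉ (hms_str_to_pg_interval_alt s).toList := by
  simp only [hms_str_to_pg_interval_alt]
  rw [hms_join]
  intro hmem
  rw [String.toList_ofList] at hmem
  obtain ⟨l, hl, hcl⟩ := List.mem_flatten.mp hmem
  obtain ⟨p, hp, rfl⟩ := List.mem_map.mp hl
  have hfree := hms_bpieces s.toList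
    [((pvSepA.get? ((PySem.Str.count s ":" : Nat) : Int)).getD "")]
    ((PySem.Str.count s ":" : Nat) : Int)
    (by intro q hq; rcases List.mem_singleton.mp hq with rfl; exact hms_sep_free _)
  exact hfree p hp hcl

-- an occurrence of '::' in a ++ ':' :: X with colon-free a starts at X or lies inside X
theorem hms_adj_split (a : List Char) (ha : ':' ∉ a) : ∀ X : List Char,
    [':', ':'] <:+: (a ++ ':' :: X) → X.head? = some ':' ∨ [':', ':'] <:+: X := by
  induction a with
  | nil =>
    intro X h
    obtain ⟨u, v, huv⟩ := h
    cases u with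
    | nil =>
      left
      simp at huv
      rw [← huv]
      rfl
    | cons c u' =>
      right
      simp at huv
      exact ⟨u', v, by simpa using huv.2⟩
  | cons c a' ih =>
    intro X h
    obtain ⟨u, v, huv⟩ := h
    cases u with
    | nil =>
      exfalso
      simp at huv
      exact ha (by simp [← huv.1])
    | cons c' u' =>
      apply ih (fun hm => ha (by simp [hm])) X
      simp at huv
      exact ⟨u', v, by simpa using huv.2⟩

-- a string containing '::' has at least two colons
theorem hms_adj_count (s : List Char) (h : [':', ':'] <:+: s) : 2 ≤ s.count ':' := by
  obtain ⟨u, v, huv⟩ := h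
  rw [← huv]
  simp [List.count_append]
  omega

theorem hms_str_to_pg_interval_tight : Claim_exact_hms_str_to_pg_interval := by
  intro s _ hpre hd
  obtain ⟨ps, hne, hfree, heq, hlen⟩ := hms_decomp s.toList
  have hcnt : PySem.Str.count s ":" = s.toList.count ':' := by
    have h : (":").toList = [':'] := rfl
    simp [PySem.Str.count, h, hms_count_eq]
  have hinf : [':', ':'] <:+: s.toList := by
    have h := (PySem.Str.isIn_iff_infix (sub := "::") (s := s)).mp hd
    simpa using h
  have hk2 : 2 ≤ s.toList.count ':' := hms_adj_count _ hinf
  have hk3 : s.toList.count ':' ≤ 3 := by rw [← hcnt]; exact hpre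
  rcases ps with _ | ⟨a, ps⟩
  · exact absurd rfl hne
  rcases ps with _ | ⟨b, ps⟩
  · simp at hlen; omega
  rcases ps with _ | ⟨c, ps⟩
  · simp at hlen; omega
  have hafree : ':' ∉ a := hfree a (by simp)
  have hbfree : ':' ∉ b := hfree b (by simp)
  have hcfree : ':' ∉ c := hfree c (by simp)
  rcases ps with _ | ⟨d, ps⟩
  · -- two colons: the interior part b must be empty
    have hab : s.toList = a ++ ':' :: (b ++ ':' :: c) := by
      simpa [List.intercalate] using heq
    have hb : b = [] := by
      have hinf2 := hinf
      rw [hab] at hinf2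
      rcases hms_adj_split a hafree _ hinf2 with hh | hh
      · cases b with
        | nil => rfl
        | cons e tl =>
          exfalso
          simp at hh
          exact hbfree (by simp [hh])
      · exfalso
        have hcc : ':' ∈ c := by
          rcases hms_adj_split b hbfree _ hh with hh2 | hh2
          · cases c with
            | nil => simp at hh2
            | cons e tl => simp at hh2; simp [hh2]
          · obtain ⟨u, v, huv⟩ := hh2
            rw [← huv]; simp
        exact hcfree hcc
    subst hb
    have hab2 : s.toList = (a ++ [':']) ++ ':' :: c := by rw [hab]; simp
    have hc2 : s.toList.count ':' = 2 := by simp at hlen; omega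
    have hq : ((PySem.Str.count s ":" : Nat) : Int) = 2 := by rw [hcnt, hc2]; rfl
    have hrange : PySem.List.pyRange 0 2 1 = ([0, 1] : List Int) := by decide
    have hmiss : PySem.Chars.rfindFrom
        ((a ++ [':']) ++ ((pvSepA.get? (0:Int)).getD "").toList ++ c) [':'] 0
        (some (((a ++ [':']).length : Int) - 1)) = -1 := by
      apply hms_rfindFrom_none
      · simp
      · simp only [List.length_append, List.length_cons, List.length_nil]; push_cast; omega
      · have he : (((a ++ [':']).length : Int) - 1).toNat = a.length := by
          simp only [List.length_append, List.length_cons, List.length_nil]; omega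
        rw [he, List.append_assoc, List.append_assoc, List.take_left]
        exact hafree
    have hA : hms_str_to_pg_interval s = String.ofList
        (((pvSepA.get? (2:Int)).getD "").toList ++
          (((a ++ [':']) ++ ((pvSepA.get? (0:Int)).getD "").toList ++ c).dropLast
            ++ ((pvSepA.get? (1:Int)).getD "").toList
            ++ ((a ++ [':']) ++ ((pvSepA.get? (0:Int)).getD "").toList ++ c))) := by
      conv_lhs =>
        simp only [hms_str_to_pg_interval, hq, hrange]
        rw [hab2, List.foldl_cons,
          hms_astep0 (a ++ [':']) c hcfree _ 0 (by simp only [List.length_append, List.length_cons, List.length_nil]; push_cast; omega) (by simp only [List.length_append, List.length_cons, List.length_nil]; push_cast; omega),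
          List.foldl_cons, hms_astep_miss _ _ 1 hmiss, List.foldl_nil]
    intro heqAB
    rw [hA] at heqAB
    apply hms_b_no_colon s
    rw [← heqAB, String.toList_ofList]
    simp
  rcases ps with _ | ⟨e, ps⟩
  · -- three colons: some interior part (b or c) is empty
    have hdfree : ':' ∉ d := hfree d (by simp)
    have hab : s.toList = a ++ ':' :: (b ++ ':' :: (c ++ ':' :: d)) := by
      simpa [List.intercalate] using heq
    have hc3 : s.toList.count ':' = 3 := by simp at hlen; omega
    have hq : ((PySem.Str.count s ":" : Nat) : Int) = 3 := by rw [hcnt, hc3]; rfl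
    have hrange : PySem.List.pyRange 0 3 1 = ([0, 1, 2] : List Int) := by decide
    have hbc : b = [] ∨ c = [] := by
      have hinf2 := hinf
      rw [hab] at hinf2
      rcases hms_adj_split a hafree _ hinf2 with hh | hh
      · left
        cases b with
        | nil => rfl
        | cons e tl => exfalso; simp at hh; exact hbfree (by simp [hh])
      · rcases hms_adj_split b hbfree _ hh with hh2 | hh2
        · right
          cases c with
          | nil => rfl
          | cons e tl => exfalso; simp at hh2; exact hcfree (by simp [hh2])
        · exfalso
          have hdd : ':' ∈ d := by
            rcases hms_adj_split c hcfree _ hh2 with hh3 | hh3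
            · cases d with
              | nil => simp at hh3
              | cons e tl => simp at hh3; simp [hh3]
            · obtain ⟨u, v, huv⟩ := hh3
              rw [← huv]; simp
          exact hdfree hdd
    by_cases hcnil : c = []
    · subst hcnil
      by_cases hanil : a = []
      · subst hanil
        -- 's starts with ':' and ends with '::': A relabels without leftover colons; evaluate both
        have hab3 : s.toList = ':' :: (b ++ ':' :: (':' :: d)) := by rw [hab]; simp
        have hshape1 : (':' :: (b ++ ':' :: (':' :: d)) : List Char)
            = (':' :: (b ++ [':'])) ++ ':' :: d := by simp
        have hshape2 : (':' :: (b ++ [':'])) ++ ((pvSepA.get? (0:Int)).getD "").toList ++ d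
            = ([] : List Char) ++ ':' :: (b ++ ([':'] ++ (((pvSepA.get? (0:Int)).getD "").toList ++ d))) := by
          simp
        have hone : (((':' :: (b ++ [':'])) : List Char).length : Int) - 1 = (b.length : Int) + 1 := by
          simp only [List.length_cons, List.length_append, List.length_nil]; push_cast; omega
        have hzero : ((([] : List Char).length : Int)) - 1 = -1 := by simp
        have hshape3 : ([] : List Char) ++ ((pvSepA.get? (1:Int)).getD "").toList
              ++ (b ++ ([':'] ++ (((pvSepA.get? (0:Int)).getD "").toList ++ d)))
            = (((pvSepA.get? (1:Int)).getD "").toList ++ b)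
              ++ ':' :: (((pvSepA.get? (0:Int)).getD "").toList ++ d) := by simp
        have hR2free : ':' ∉ ((pvSepA.get? (0:Int)).getD "").toList ++ d := by
          intro h
          rcases List.mem_append.mp h with h | h
          · exact hms_sep_free 0 h
          · exact hdfree h
        have hR2ne : ((pvSepA.get? (0:Int)).getD "").toList ++ d ≠ [] := by
          simp [show ((pvSepA.get? (0:Int)).getD "") = "S" from rfl]
        have hA : hms_str_to_pg_interval s = String.ofList ('D' :: 'M' :: (b ++ 'H' :: 'S' :: d)) := by
          conv_lhs =>
            simp only [hms_str_to_pg_interval, hq, hrange]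
            rw [hab3, hshape1, List.foldl_cons,
              hms_astep0 (':' :: (b ++ [':'])) d hdfree _ 0 (by simp only [List.length_append, List.length_cons, List.length_nil]; push_cast; omega) (by simp only [List.length_append, List.length_cons, List.length_nil]; push_cast; omega),
              hshape2, List.foldl_cons, hone]
            rw [hms_astep [] b ([':'] ++ (((pvSepA.get? (0:Int)).getD "").toList ++ d)) hbfree
                ((b.length : Int) + 1) 1 (by simp only [List.length_nil, Nat.cast_zero]; omega) (by simp)]
            rw [hzero, hshape3, List.foldl_cons,
              hms_astep_neg (((pvSepA.get? (1:Int)).getD "").toList ++ b)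
                (((pvSepA.get? (0:Int)).getD "").toList ++ d) hR2free hR2ne 2,
              List.foldl_nil]
          refine congrArg String.ofList ?_
          simp [show ((pvSepA.get? (0:Int)).getD "") = "S" from rfl,
            show ((pvSepA.get? (1:Int)).getD "") = "M" from rfl,
            show ((pvSepA.get? (2:Int)).getD "") = "H" from rfl,
            show ((pvSepA.get? (3:Int)).getD "") = "D" from rfl]
        have hB : hms_str_to_pg_interval_alt s = String.ofList ('D' :: 'H' :: (b ++ 'M' :: 'S' :: d)) := by
          conv_lhs =>
            simp only [hms_str_to_pg_interval_alt, hq]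
            rw [hab3, List.foldl_cons]
            rw [show pvBStep ([((pvSepA.get? (3:Int)).getD "")], (3:Int)) ':'
                = ([((pvSepA.get? (3:Int)).getD "")] ++ [((pvSepA.get? (2:Int)).getD "")], 2) from by
              simp [pvBStep]]
            rw [List.foldl_append, hms_bfold b hbfree, List.foldl_cons]
            rw [show ∀ acc : List String, pvBStep (acc, (2:Int)) ':'
                = (acc ++ [((pvSepA.get? (1:Int)).getD "")], 1) from fun acc => by simp [pvBStep]]
            rw [List.foldl_cons]
            rw [show ∀ acc : List String, pvBStep (acc, (1:Int)) ':'
                = (acc ++ [((pvSepA.get? (0:Int)).getD "")], 0) from fun acc => by simp [pvBStep]]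
            rw [hms_bfold d hdfree, hms_join]
          refine congrArg String.ofList ?_
          simp [hms_flat_map, List.map_map, Function.comp_def,
            show ((pvSepA.get? (0:Int)).getD "") = "S" from rfl,
            show ((pvSepA.get? (1:Int)).getD "") = "M" from rfl,
            show ((pvSepA.get? (2:Int)).getD "") = "H" from rfl,
            show ((pvSepA.get? (3:Int)).getD "") = "D" from rfl]
        intro heqAB
        rw [hA, hB] at heqAB
        have hlist := congrArg String.toList heqAB
        simp at hlist
      · -- a ≠ []: the second rfind misses inside a, the string is duplicated and keeps a colon
        have hhalen : 0 < a.length := List.length_pos_iff.mpr hanil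
        have hab3 : s.toList = (a ++ ':' :: (b ++ [':'])) ++ ':' :: d := by rw [hab]; simp
        have hshape2 : (a ++ ':' :: (b ++ [':'])) ++ ((pvSepA.get? (0:Int)).getD "").toList ++ d
            = a ++ ':' :: (b ++ ([':'] ++ (((pvSepA.get? (0:Int)).getD "").toList ++ d))) := by simp
        have hmiss : PySem.Chars.rfindFrom
            (a ++ ((pvSepA.get? (1:Int)).getD "").toList
              ++ (b ++ ([':'] ++ (((pvSepA.get? (0:Int)).getD "").toList ++ d)))) [':'] 0
            (some ((a.length : Int) - 1)) = -1 := by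
          apply hms_rfindFrom_none
          · omega
          · simp only [List.length_append, List.length_cons, List.length_nil]; push_cast; omega
          · have he : (((a.length : Int)) - 1).toNat = a.length - 1 := by omega
            rw [he, List.take_append_of_le_length (by simp only [List.length_append]; omega),
              List.take_append_of_le_length (by omega)]
            exact fun h => hafree (List.mem_of_mem_take h)
        have hA : hms_str_to_pg_interval s = String.ofList
            (((pvSepA.get? (3:Int)).getD "").toList
              ++ ((a ++ ((pvSepA.get? (1:Int)).getD "").toList
                    ++ (b ++ ([':'] ++ (((pvSepA.get? (0:Int)).getD "").toList ++ d)))).dropLast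
                ++ ((pvSepA.get? (2:Int)).getD "").toList
                ++ (a ++ ((pvSepA.get? (1:Int)).getD "").toList
                    ++ (b ++ ([':'] ++ (((pvSepA.get? (0:Int)).getD "").toList ++ d)))))) := by
          conv_lhs =>
            simp only [hms_str_to_pg_interval, hq, hrange]
            rw [hab3, List.foldl_cons,
              hms_astep0 (a ++ ':' :: (b ++ [':'])) d hdfree _ 0 (by simp only [List.length_append, List.length_cons, List.length_nil]; push_cast; omega) (by simp only [List.length_append, List.length_cons, List.length_nil]; push_cast; omega),
              hshape2, List.foldl_cons,
              hms_astep a b ([':'] ++ (((pvSepA.get? (0:Int)).getD "").toList ++ d)) hbfree _ 1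
                (by simp only [List.length_append, List.length_cons, List.length_nil]; push_cast; omega) (by simp only [List.length_append, List.length_cons, List.length_nil]; push_cast; omega),
              List.foldl_cons, hms_astep_miss _ _ 2 hmiss, List.foldl_nil]
        intro heqAB
        rw [hA] at heqAB
        apply hms_b_no_colon s
        rw [← heqAB, String.toList_ofList]
        simp
    · -- c ≠ [], so b = []: the second rfind already misses, the string keeps a colon
      have hbnil : b = [] := hbc.resolve_right hcnil
      subst hbnil
      have hhclen : 0 < c.length := List.length_pos_iff.mpr hcnil
      have hab3 : s.toList = (a ++ ':' :: (':' :: c)) ++ ':' :: d := by rw [hab]; simp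
      have hshape2 : (a ++ ':' :: (':' :: c)) ++ ((pvSepA.get? (0:Int)).getD "").toList ++ d
          = (a ++ [':']) ++ ':' :: (c ++ (((pvSepA.get? (0:Int)).getD "").toList ++ d)) := by simp
      have hmiss : PySem.Chars.rfindFrom
          ((a ++ [':']) ++ ((pvSepA.get? (1:Int)).getD "").toList
            ++ (c ++ (((pvSepA.get? (0:Int)).getD "").toList ++ d))) [':'] 0
          (some (((a ++ [':']).length : Int) - 1)) = -1 := by
        apply hms_rfindFrom_none
        · simp
        · simp only [List.length_append, List.length_cons, List.length_nil]; push_cast; omega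
        · have he : (((a ++ [':']).length : Int) - 1).toNat = a.length := by
            simp only [List.length_append, List.length_cons, List.length_nil]; omega
          rw [he, List.append_assoc, List.append_assoc, List.take_left]
          exact hafree
      have hA : hms_str_to_pg_interval s = String.ofList
          (((pvSepA.get? (3:Int)).getD "").toList
            ++ (((a ++ [':']) ++ ((pvSepA.get? (1:Int)).getD "").toList
                  ++ (c ++ (((pvSepA.get? (0:Int)).getD "").toList ++ d))).dropLast
              ++ ((pvSepA.get? (2:Int)).getD "").toList
              ++ ((a ++ [':']) ++ ((pvSepA.get? (1:Int)).getD "").toList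
                  ++ (c ++ (((pvSepA.get? (0:Int)).getD "").toList ++ d))))) := by
        conv_lhs =>
          simp only [hms_str_to_pg_interval, hq, hrange]
          rw [hab3, List.foldl_cons,
            hms_astep0 (a ++ ':' :: (':' :: c)) d hdfree _ 0 (by simp only [List.length_append, List.length_cons, List.length_nil]; push_cast; omega) (by simp only [List.length_append, List.length_cons, List.length_nil]; push_cast; omega),
            hshape2, List.foldl_cons,
            hms_astep (a ++ [':']) c (((pvSepA.get? (0:Int)).getD "").toList ++ d) hcfree _ 1
              (by simp only [List.length_append, List.length_cons, List.length_nil]; push_cast; omega) (by simp only [List.length_append, List.length_cons, List.length_nil]; push_cast; omega),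
            List.foldl_cons, hms_astep_miss _ _ 2 hmiss, List.foldl_nil]
      intro heqAB
      rw [hA] at heqAB
      apply hms_b_no_colon s
      rw [← heqAB, String.toList_ofList]
      simp
  · simp at hlen; omega

-- ===== VERDICT (by name: the statement is the Claim_ definition above) =====
theorem hms_str_to_pg_interval_spec : Claim_unchanged_hms_str_to_pg_interval := by
  intro s _ hpre hnd
  show hms_str_to_pg_interval s = hms_str_to_pg_interval_alt s
  obtain ⟨ps, hne, hfree, heq, hlen⟩ := hms_decomp s.toList
  have hcnt : PySem.Str.count s ":" = s.toList.count ':' := by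
    have : (":").toList = [':'] := rfl
    simp [PySem.Str.count, this, hms_count_eq]
  have hk3 : s.toList.count ':' ≤ 3 := by rw [← hcnt]; exact hpre
  have hlen4 : ps.length ≤ 4 := by omega
  rcases ps with _ | ⟨a, ps⟩
  · exact absurd rfl hne
  rcases ps with _ | ⟨b, ps⟩
  · -- no colon
    have ha : s.toList = a := by simpa [List.intercalate] using heq
    have hc0 : s.toList.count ':' = 0 := by simp at hlen; omega
    have hq : ((PySem.Str.count s ":" : Nat) : Int) = 0 := by rw [hcnt, hc0]; rfl
    have hrange : PySem.List.pyRange 0 0 1 = ([] : List Int) := by decide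
    simp only [hms_str_to_pg_interval, hms_str_to_pg_interval_alt, hq, hrange,
      List.foldl_nil, ha]
    rw [hms_bfold a (hfree a (by simp)), hms_join]
    simp [hms_flat_map, List.map_map, Function.comp_def]
  rcases ps with _ | ⟨c, ps⟩
  · -- one colon: s = a ++ ':' :: b
    have hab : s.toList = a ++ ':' :: (b ++ []) := by
      simpa [List.intercalate] using heq
    have hc1 : s.toList.count ':' = 1 := by simp at hlen; omega
    have hq : ((PySem.Str.count s ":" : Nat) : Int) = 1 := by rw [hcnt, hc1]; rfl
    have hrange : PySem.List.pyRange 0 1 1 = ([0] : List Int) := by decide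
    have hafree : ':' ∉ a := hfree a (by simp)
    have hbfree : ':' ∉ b := hfree b (by simp)
    simp only [hms_str_to_pg_interval, hms_str_to_pg_interval_alt, hq, hrange,
      List.foldl_cons, List.foldl_nil, hab]
    rw [hms_astep a b [] hbfree _ 0 (by simp only [List.length_append, List.length_cons, List.length_nil]; push_cast; omega) (by simp only [List.length_append, List.length_cons, List.length_nil]; push_cast; omega)]
    rw [List.foldl_append, hms_bfold a hafree, List.foldl_cons]
    have hcol : pvBStep (([((pvSepA.get? 1).getD "")] ++ a.map (fun c => String.ofList [c])), 1) ':'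
        = (([((pvSepA.get? 1).getD "")] ++ a.map (fun c => String.ofList [c])) ++ [((pvSepA.get? 0).getD "")], 0) := by
      simp [pvBStep]
    rw [hcol, List.foldl_append, List.foldl_nil, hms_bfold b hbfree, hms_join]
    simp [hms_flat_map, List.map_map, Function.comp_def]
  rcases ps with _ | ⟨d, ps⟩
  · -- two colons: s = a ++ ':' :: (b ++ ':' :: c)
    have hab : s.toList = a ++ ':' :: (b ++ ':' :: c) := by
      simpa [List.intercalate] using heq
    have hc2 : s.toList.count ':' = 2 := by simp at hlen; omega
    have hq : ((PySem.Str.count s ":" : Nat) : Int) = 2 := by rw [hcnt, hc2]; rfl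
    have hrange : PySem.List.pyRange 0 2 1 = ([0, 1] : List Int) := by decide
    have hafree : ':' ∉ a := hfree a (by simp)
    have hbfree : ':' ∉ b := hfree b (by simp)
    have hcfree : ':' ∉ c := hfree c (by simp)
    have hbne : b ≠ [] := by
      rintro rfl
      apply hnd
      show PySem.Str.isIn "::" s = true
      rw [PySem.Str.isIn_iff_infix]
      exact ⟨a, c, by rw [hab]; simp⟩
    have hblen : 0 < b.length := List.length_pos_iff.mpr hbne
    have hshape1 : a ++ ':' :: (b ++ ':' :: c) = (a ++ ':' :: b) ++ ':' :: c := by simp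
    have hshape2 : (a ++ ':' :: b) ++ ((pvSepA.get? (0:Int)).getD "").toList ++ c
        = a ++ ':' :: (b ++ (((pvSepA.get? (0:Int)).getD "").toList ++ c)) := by simp
    conv_lhs =>
      simp only [hms_str_to_pg_interval, hq, hrange]
      rw [hab, hshape1, List.foldl_cons,
        hms_astep0 (a ++ ':' :: b) c hcfree _ 0 (by simp only [List.length_append, List.length_cons, List.length_nil]; push_cast; omega) (by simp only [List.length_append, List.length_cons, List.length_nil]; push_cast; omega),
        hshape2, List.foldl_cons,
        hms_astep a b _ hbfree _ 1 (by simp only [List.length_append, List.length_cons, List.length_nil]; push_cast; omega) (by simp only [List.length_append, List.length_cons, List.length_nil]; push_cast; omega),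
        List.foldl_nil]
    conv_rhs =>
      simp only [hms_str_to_pg_interval_alt, hq]
      rw [hab, List.foldl_append, hms_bfold a hafree, List.foldl_cons]
    rw [show pvBStep (([((pvSepA.get? (2:Int)).getD "")] ++ a.map (fun c => String.ofList [c])), 2) ':'
        = (([((pvSepA.get? (2:Int)).getD "")] ++ a.map (fun c => String.ofList [c]))
            ++ [((pvSepA.get? (1:Int)).getD "")], 1) from by simp [pvBStep],
      List.foldl_append, hms_bfold b hbfree, List.foldl_cons]
    rw [show ∀ acc : List String, pvBStep ((acc, (1:Int))) ':' = (acc ++ [((pvSepA.get? (0:Int)).getD "")], 0) from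
        fun acc => by simp [pvBStep]]
    rw [hms_bfold c hcfree, hms_join]
    simp [hms_flat_map, List.map_map, Function.comp_def]
  rcases ps with _ | ⟨e, ps⟩
  · -- three colons: s = a ++ ':' :: (b ++ ':' :: (c ++ ':' :: d))
    have hab : s.toList = a ++ ':' :: (b ++ ':' :: (c ++ ':' :: d)) := by
      simpa [List.intercalate] using heq
    have hc3 : s.toList.count ':' = 3 := by simp at hlen; omega
    have hq : ((PySem.Str.count s ":" : Nat) : Int) = 3 := by rw [hcnt, hc3]; rfl
    have hrange : PySem.List.pyRange 0 3 1 = ([0, 1, 2] : List Int) := by decide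
    have hafree : ':' ∉ a := hfree a (by simp)
    have hbfree : ':' ∉ b := hfree b (by simp)
    have hcfree : ':' ∉ c := hfree c (by simp)
    have hdfree : ':' ∉ d := hfree d (by simp)
    have hbne : b ≠ [] := by
      rintro rfl
      apply hnd
      show PySem.Str.isIn "::" s = true
      rw [PySem.Str.isIn_iff_infix]
      exact ⟨a, c ++ ':' :: d, by rw [hab]; simp⟩
    have hcne : c ≠ [] := by
      rintro rfl
      apply hnd
      show PySem.Str.isIn "::" s = true
      rw [PySem.Str.isIn_iff_infix]
      exact ⟨a ++ ':' :: b, d, by rw [hab]; simp⟩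
    have hblen : 0 < b.length := List.length_pos_iff.mpr hbne
    have hclen : 0 < c.length := List.length_pos_iff.mpr hcne
    have hshape1 : a ++ ':' :: (b ++ ':' :: (c ++ ':' :: d))
        = (a ++ ':' :: (b ++ ':' :: c)) ++ ':' :: d := by simp
    have hshape2 : (a ++ ':' :: (b ++ ':' :: c)) ++ ((pvSepA.get? (0:Int)).getD "").toList ++ d
        = (a ++ ':' :: b) ++ ':' :: (c ++ (((pvSepA.get? (0:Int)).getD "").toList ++ d)) := by simp
    have hshape3 : (a ++ ':' :: b) ++ ((pvSepA.get? (1:Int)).getD "").toList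
          ++ (c ++ (((pvSepA.get? (0:Int)).getD "").toList ++ d))
        = a ++ ':' :: (b ++ (((pvSepA.get? (1:Int)).getD "").toList
            ++ (c ++ (((pvSepA.get? (0:Int)).getD "").toList ++ d)))) := by simp
    conv_lhs =>
      simp only [hms_str_to_pg_interval, hq, hrange]
      rw [hab, hshape1, List.foldl_cons,
        hms_astep0 (a ++ ':' :: (b ++ ':' :: c)) d hdfree _ 0 (by simp only [List.length_append, List.length_cons, List.length_nil]; push_cast; omega) (by simp only [List.length_append, List.length_cons, List.length_nil]; push_cast; omega),
        hshape2, List.foldl_cons,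
        hms_astep (a ++ ':' :: b) c _ hcfree _ 1 (by simp only [List.length_append, List.length_cons, List.length_nil]; push_cast; omega) (by simp only [List.length_append, List.length_cons, List.length_nil]; push_cast; omega),
        hshape3, List.foldl_cons,
        hms_astep a b _ hbfree _ 2 (by simp only [List.length_append, List.length_cons, List.length_nil]; push_cast; omega) (by simp only [List.length_append, List.length_cons, List.length_nil]; push_cast; omega),
        List.foldl_nil]
    conv_rhs =>
      simp only [hms_str_to_pg_interval_alt, hq]
      rw [hab, List.foldl_append, hms_bfold a hafree, List.foldl_cons]
    rw [show pvBStep (([((pvSepA.get? (3:Int)).getD "")] ++ a.map (fun c => String.ofList [c])), 3) ':'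
        = (([((pvSepA.get? (3:Int)).getD "")] ++ a.map (fun c => String.ofList [c]))
            ++ [((pvSepA.get? (2:Int)).getD "")], 2) from by simp [pvBStep],
      List.foldl_append, hms_bfold b hbfree, List.foldl_cons]
    rw [show ∀ acc : List String, pvBStep ((acc, (2:Int))) ':' = (acc ++ [((pvSepA.get? (1:Int)).getD "")], 1) from
        fun acc => by simp [pvBStep],
      List.foldl_append, hms_bfold c hcfree, List.foldl_cons]
    rw [show ∀ acc : List String, pvBStep ((acc, (1:Int))) ':' = (acc ++ [((pvSepA.get? (0:Int)).getD "")], 0) from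
        fun acc => by simp [pvBStep]]
    rw [hms_bfold d hdfree, hms_join]
    simp [hms_flat_map, List.map_map, Function.comp_def]
  · -- four or more parts contradict the ≤ 3 colons of Pre_
    exfalso
    simp at hlen
    omega

theorem hms_str_to_pg_interval_changed : Claim_changed_hms_str_to_pg_interval := by
  unfold Claim_changed_hms_str_to_pg_interval; decide
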